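-- pv_equiv track=rewrite | github.com/manwar/perlweeklychallenge-club | challenge-346/ulrich-rieke/python/ch-1.py | findLength
-- ===== SOURCE A (Python) =====
-- def findLength( word , start):
--    balances = []
--    balance = 1
--    length = len( word )
--    balances.append( balance )
--    start += 1
--    while start < length:
--       letter = word[start]
--       if letter == '(':
--          balance += 1
--       else:
--          balance -= 1
--       if balance < 0:
--          break
--       balances.append( balance )
--       start += 1
--    howmany = balances.count( 0 )
--    result = 0
--    if howmany == 0:
--       result = 0
--    elif howmany == 1:
--       result = balances.index( 0 ) + 1
--    else:
--       cur = len(balances) - 1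
--       while balances[cur] != 0:
--           cur -= 1
--       result = cur + 1
--    return result
-- ===== SOURCE B (Python) =====
-- def findLength(word, start):
--     balance = 1
--     last_zero = -1
--     idx = 1
--     n = len(word)
--     i = start + 1
--     while i < n:
--         if word[i] == '(':
--             balance += 1
--         else:
--             balance -= 1
--         if balance < 0:
--             break
--         if balance == 0:
--             last_zero = idx
--         idx += 1
--         i += 1
--     return last_zero + 1
-- ===== Notes on version B (the rewrite author's own statement) =====
-- stated objective: simpler
-- what changed: B drops A's balances list and its whole post-phase (count, index, backward scan): a single forward pass tracks the running balance and the position of the last zero, returning last_zero+1.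
import Mathlib
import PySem

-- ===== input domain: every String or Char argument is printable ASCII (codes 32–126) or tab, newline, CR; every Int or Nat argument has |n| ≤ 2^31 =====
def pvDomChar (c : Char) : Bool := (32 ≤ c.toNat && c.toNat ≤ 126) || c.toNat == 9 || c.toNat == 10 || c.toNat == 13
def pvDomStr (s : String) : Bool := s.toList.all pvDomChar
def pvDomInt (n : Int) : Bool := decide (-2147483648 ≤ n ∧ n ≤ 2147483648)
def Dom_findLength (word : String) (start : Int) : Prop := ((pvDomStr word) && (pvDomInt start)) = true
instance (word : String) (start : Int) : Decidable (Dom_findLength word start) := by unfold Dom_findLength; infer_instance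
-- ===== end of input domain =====

-- B replaces A's balances list and its count/index/backward-scan post-phase by a single
-- forward pass tracking the running balance and the last position where it hit zero (simpler).


-- ===== PORT A =====
-- the while loop building `balances` (fuel = remaining iterations; pyGet? none = IndexError, excluded by Pre_)
def findLengthLoopA (w : List Char) : Nat → Int → Int → List Int → List Int
  | 0, _, _, balances => balances
  | f+1, start, balance, balances =>
    if start < (w.length : Int) then
      match PySem.List.pyGet? w start with
      | none => balances
      | some letter =>
        let b' := if letter = '(' then balance + 1 else balance - 1
        if b' < 0 then balances
        else findLengthLoopA w f (start+1) b' (balances ++ [b'])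
    else balances

-- the backward `while balances[cur] != 0: cur -= 1` scan
def findLengthBack (balances : List Int) : Nat → Int → Int
  | 0, cur => cur
  | f+1, cur =>
    match PySem.List.pyGet? balances cur with
    | none => cur
    | some v => if v ≠ 0 then findLengthBack balances f (cur-1) else cur

def findLength (word : String) (start : Int) : Int :=
  let w := word.toList
  let s := start + 1
  let balances := findLengthLoopA w ((w.length : Int) - s).toNat s 1 [1]
  let howmany := PySem.List.count balances 0
  if howmany = 0 then 0
  else if howmany = 1 then
    match PySem.List.index? balances 0 with
    | some j => (j : Int) + 1
    | none => 0
  else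
    findLengthBack balances balances.length ((balances.length : Int) - 1) + 1

-- ===== PORT B =====
-- single forward pass: running balance, last index (in A's would-be balances numbering) where it was 0
def findLengthLoopB (w : List Char) : Nat → Int → Int → Int → Int → Int
  | 0, _, _, lastZero, _ => lastZero
  | f+1, i, balance, lastZero, idx =>
    if i < (w.length : Int) then
      match PySem.List.pyGet? w i with
      | none => lastZero
      | some ch =>
        let b' := if ch = '(' then balance + 1 else balance - 1
        if b' < 0 then lastZero
        else
          findLengthLoopB w f (i+1) b' (if b' = 0 then idx else lastZero) (idx+1)
    else lastZero

def findLength_alt (word : String) (start : Int) : Int :=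
  let w := word.toList
  let i := start + 1
  findLengthLoopB w ((w.length : Int) - i).toNat i 1 (-1) 1 + 1

-- ===== PRECONDITION & SPEC =====
-- excludes exactly the inputs where Python A raises IndexError: the first access word[start+1]
-- happens (start+1 < len) with start+1 below -len
def Pre_findLength (word : String) (start : Int) : Prop :=
  ¬ (start + 1 < (word.toList.length : Int) ∧ start + 1 < -(word.toList.length : Int))
instance (word : String) (start : Int) : Decidable (Pre_findLength word start) := by unfold Pre_findLength; infer_instance
def pvWitness_findLength : String × Int := ("(())", 0)

def Spec_findLength (word : String) (start : Int) (out : Int) : Prop := out = findLength_alt word start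
instance (word : String) (start : Int) (out : Int) : Decidable (Spec_findLength word start out) := by unfold Spec_findLength; infer_instance

-- ===== CLAIM (what is proved, stated in full; the proofs are below) =====
def Claim_equal_findLength : Prop := ∀ (word : String) (start : Int), Dom_findLength word start → Pre_findLength word start → Spec_findLength word start (findLength word start)

-- ===== LEMMAS AND PROOFS =====

-- last index (counting from `idx`) at which the list holds 0, `acc` if none
def lzi : List Int → Int → Int → Int
  | [], _, acc => acc
  | x :: xs, idx, acc => lzi xs (idx+1) (if x = 0 then idx else acc)

theorem lzi_not_mem : ∀ (bs : List Int) (idx acc : Int), 0 ∉ bs → lzi bs idx acc = acc := by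
  intro bs
  induction bs with
  | nil => intro idx acc _; rfl
  | cons x xs ih =>
    intro idx acc h
    have hx : x ≠ 0 := fun hx => h (hx ▸ List.mem_cons_self)
    simp [lzi, hx, ih _ _ (fun hm => h (List.mem_cons_of_mem _ hm))]

theorem lzi_append : ∀ (l t : List Int) (idx acc : Int),
    lzi (l ++ t) idx acc = lzi t (idx + l.length) (lzi l idx acc) := by
  intro l
  induction l with
  | nil => intro t idx acc; simp [lzi]
  | cons x xs ih =>
    intro t idx acc
    simp only [List.cons_append, lzi, ih, List.length_cons]
    congr 1
    push_cast
    ring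

theorem lzi_snoc (bs : List Int) (x : Int) :
    lzi (bs ++ [x]) 0 (-1) = if x = 0 then (bs.length : Int) else lzi bs 0 (-1) := by
  rw [lzi_append]
  simp [lzi]

-- loop invariant: B's pass computes the last-zero index of A's final balances list
theorem loop_inv (w : List Char) : ∀ (fuel : Nat) (i b : Int) (bs : List Int),
    findLengthLoopB w fuel i b (lzi bs 0 (-1)) (bs.length : Int)
      = lzi (findLengthLoopA w fuel i b bs) 0 (-1) := by
  intro fuel
  induction fuel with
  | zero => intro i b bs; rfl
  | succ f ih =>
    intro i b bs
    simp only [findLengthLoopA, findLengthLoopB]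
    split
    · cases hget : PySem.List.pyGet? w i with
      | none => rfl
      | some ch =>
        simp only
        generalize (if ch = '(' then b + 1 else b - 1) = b'
        split
        · rfl
        · have h2 := ih (i+1) b' (bs ++ [b'])
          rw [lzi_snoc] at h2
          have hlen : (((bs ++ [b']).length : Nat) : Int) = (bs.length : Int) + 1 := by
            simp
          rw [hlen] at h2
          exact h2
    · rfl

theorem exists_last_zero : ∀ (bs : List Int), 0 ∈ bs →
    ∃ pre suf, bs = pre ++ 0 :: suf ∧ 0 ∉ suf := by
  intro bs
  induction bs with
  | nil => intro h; cases h
  | cons x xs ih =>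
    intro h
    by_cases hx : 0 ∈ xs
    · obtain ⟨p, s, heq, hs⟩ := ih hx
      exact ⟨x :: p, s, by rw [heq]; rfl, hs⟩
    · have hx0 : x = 0 := by
        rcases List.mem_cons.mp h with h1 | h2
        · exact h1.symm
        · exact absurd h2 hx
      exact ⟨[], xs, by simp [hx0], hx⟩

theorem lzi_last (pre suf : List Int) (hs : 0 ∉ suf) :
    lzi (pre ++ 0 :: suf) 0 (-1) = (pre.length : Int) := by
  rw [lzi_append]
  simp only [lzi, zero_add]
  exact lzi_not_mem suf _ _ hs

-- backward scan from position pre.length + k lands on the zero at pre.length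
theorem back_scan (pre suf : List Int) (hs : 0 ∉ suf) :
    ∀ (k fuel : Nat), k ≤ suf.length → k + 1 ≤ fuel →
    findLengthBack (pre ++ 0 :: suf) fuel ((pre.length : Int) + k) = (pre.length : Int) := by
  intro k
  induction k with
  | zero =>
    intro fuel _ hfuel
    obtain ⟨f, rfl⟩ : ∃ f, fuel = f + 1 := ⟨fuel - 1, by omega⟩
    simp only [findLengthBack, Nat.cast_zero, add_zero]
    have : PySem.List.pyGet? (pre ++ 0 :: suf) (pre.length : Int) = some 0 :=
      PySem.List.pyGet?_append_length pre suf 0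
    rw [this]
    simp
  | succ k ih =>
    intro fuel hk hfuel
    obtain ⟨f, rfl⟩ : ∃ f, fuel = f + 1 := ⟨fuel - 1, by omega⟩
    simp only [findLengthBack]
    have hidx : (pre.length : Int) + ((k : Nat) + 1 : Nat) = (pre.length : Int) + ((1 + k : Nat)) := by
      push_cast; ring
    have hget : PySem.List.pyGet? (pre ++ 0 :: suf) ((pre.length : Int) + ((k : Nat) + 1 : Nat))
        = some suf[k] := by
      rw [hidx]
      rw [PySem.List.pyGet?_append_right]
      have hk' : k < suf.length := by omega
      simp [List.getElem?_cons, hk']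
      rfl
    rw [hget]
    have hne : suf[k] ≠ 0 := by
      intro h0
      exact hs (h0 ▸ List.getElem_mem (l := suf) (by omega))
    simp only [hne, if_pos, ne_eq, not_false_eq_true]
    have harith : (pre.length : Int) + ((k : Nat) + 1 : Nat) - 1 = (pre.length : Int) + (k : Nat) := by
      push_cast; ring
    rw [harith]
    exact ih f (by omega) (by omega)

-- A's whole post-phase equals (last-zero index) + 1, for every balances list
theorem post_eq (bs : List Int) :
    (if PySem.List.count bs 0 = 0 then 0
     else if PySem.List.count bs 0 = 1 then
       match PySem.List.index? bs 0 with
       | some j => (j : Int) + 1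
       | none => 0
     else findLengthBack bs bs.length ((bs.length : Int) - 1) + 1)
    = lzi bs 0 (-1) + 1 := by
  rw [PySem.List.count_eq]
  by_cases hmem : 0 ∈ bs
  · obtain ⟨pre, suf, rfl, hs⟩ := exists_last_zero bs hmem
    have hcount : (pre ++ 0 :: suf).count 0 = pre.count 0 + 1 := by
      simp [List.count_append, List.count_eq_zero.mpr hs]
    have hpos : (pre ++ 0 :: suf).count 0 ≠ 0 := by omega
    rw [if_neg hpos, lzi_last pre suf hs]
    by_cases h1 : (pre ++ 0 :: suf).count 0 = 1
    · have hpre : 0 ∉ pre := by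
        have : pre.count 0 = 0 := by omega
        exact List.count_eq_zero.mp this
      have hidx : PySem.List.index? (pre ++ 0 :: suf) 0 = some pre.length :=
        (PySem.List.index?_eq_some_iff _ _ _).mpr ⟨pre, suf, rfl, rfl, hpre⟩
      rw [if_pos h1, hidx]
    · rw [if_neg h1]
      have hlen : ((pre ++ 0 :: suf).length : Int) - 1 = (pre.length : Int) + (suf.length : Nat) := by
        simp [List.length_append]
        push_cast; ring
      rw [hlen, back_scan pre suf hs suf.length _ le_rfl (by simp [List.length_append])]
  · have hcount : bs.count 0 = 0 := List.count_eq_zero.mpr hmem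
    rw [if_pos hcount, lzi_not_mem bs 0 (-1) hmem]
    norm_num

-- ===== VERDICT (by name: the statement is the Claim_ definition above) =====
theorem findLength_spec : Claim_equal_findLength := by
  intro word start _ _
  unfold Spec_findLength findLength findLength_alt
  simp only
  rw [post_eq, ← loop_inv]
  rfl
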